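-- pv_equiv track=rewrite | github.com/philippe753/Applied-Data-Science | BayesianNeuralNet/file_operations.py | parent_path
-- ===== SOURCE A (Python) =====
-- class InvalidPathError(Exception):
--     """ When a path could never point to a file, e.g missing .extension"""
--     pass
--
-- def parent_path(path: str, parent_num: int=1) -> str:
--     if len(path) <= 1:
--         raise InvalidPathError
--
--     parent_path_start = 0
--     if len(path) <= 1:
--         raise InvalidPathError
--     for i, char in enumerate(reversed(path)):
--         if char == '/' or char == '\\':
--             parent_path_start = i + 1
--             break
--
--     parent_path_str = path
--     if parent_path_start != 0:
--         parent_path_str = path[:-parent_path_start]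
--
--     if parent_num > 1:
--         return parent_path(parent_path_str, parent_num - 1)
--
--     return parent_path_str
-- ===== SOURCE B (Python) =====
-- class InvalidPathError(Exception):
--     """ When a path could never point to a file, e.g missing .extension"""
--     pass
--
-- def parent_path(path: str, parent_num: int=1) -> str:
--     for _ in range(max(parent_num, 1)):
--         if len(path) <= 1:
--             raise InvalidPathError
--         pos = max(path.rfind('/'), path.rfind('\\'))
--         if pos != -1:
--             path = path[:pos]
--     return path
-- ===== Notes on version B (the rewrite author's own statement) =====
-- stated objective: simpler
-- what changed: Replaces A's tail recursion and hand-written reversed enumerate scan with a flat loop of max(parent_num,1) iterations that cuts the path at max(path.rfind('/'), path.rfind('\\')).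
import Mathlib
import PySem

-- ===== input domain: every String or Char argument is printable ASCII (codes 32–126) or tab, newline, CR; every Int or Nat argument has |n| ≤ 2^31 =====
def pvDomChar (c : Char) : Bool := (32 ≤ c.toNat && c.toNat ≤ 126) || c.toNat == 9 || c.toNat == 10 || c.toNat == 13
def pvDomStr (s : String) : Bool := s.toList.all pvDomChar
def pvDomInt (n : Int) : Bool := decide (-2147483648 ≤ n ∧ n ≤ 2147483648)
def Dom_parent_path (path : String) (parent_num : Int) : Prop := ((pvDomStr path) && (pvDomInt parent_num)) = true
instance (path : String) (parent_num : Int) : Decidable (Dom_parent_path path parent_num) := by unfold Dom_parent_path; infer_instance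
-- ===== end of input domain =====

-- B replaces A's tail recursion and hand-written reversed enumerate scan by a flat loop of
-- max(parent_num,1) iterations, each using str.rfind to cut at the last separator (objective: simpler).

-- ===== PORT A =====
def pvIsSep (c : Char) : Bool := c == '/' || c == '\\'

-- for i, char in enumerate(reversed(path)): if char == '/' or char == '\\': parent_path_start = i + 1; break
def findSepA : List Char → Nat → Nat
  | [], _ => 0
  | c :: cs, i => if pvIsSep c then i + 1 else findSepA cs (i + 1)

def parent_path (path : String) (parent_num : Int) : String :=
  let l := path.toList
  if l.length ≤ 1 then ""           -- raise InvalidPathError (Pre_ excludes this)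
  else if l.length ≤ 1 then ""      -- A's duplicated length check (raise InvalidPathError)
  else
    let start := findSepA l.reverse 0
    -- path[:-start]; exact as take (len - start) since here 1 ≤ start ≤ len(path)
    let s := if start ≠ 0 then String.ofList (l.take (l.length - start)) else path
    if h : parent_num > 1 then parent_path s (parent_num - 1) else s
termination_by parent_num.toNat
decreasing_by omega

-- ===== PORT B =====
-- the body of B's for-loop, run (max parent_num 1) times; returning "" transcribes the raise
def stripLoopB : Nat → List Char → String
  | 0, l => String.ofList l
  | k+1, l =>
    if l.length ≤ 1 then ""         -- raise InvalidPathError (Pre_ excludes this)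
    else
      let pos := max (PySem.Chars.rfind l ['/']) (PySem.Chars.rfind l ['\\'])
      -- path[:pos]; exact as take pos.toNat since here 0 ≤ pos
      stripLoopB k (if pos ≠ -1 then l.take pos.toNat else l)

def parent_path_alt (path : String) (parent_num : Int) : String :=
  stripLoopB (max parent_num 1).toNat path.toList

-- ===== PRECONDITION & SPEC =====
-- separator positions in the path, rightmost first
def pvSepsDesc (l : List Char) : List Nat :=
  ((List.range l.length).filter (fun i => pvIsSep (l.getD i ' '))).reverse

-- Pre_ excludes exactly the inputs where A raises InvalidPathError: paths of length ≤ 1, and inputs where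
-- one of the first max(parent_num,1)-1 separators counted from the right sits at position < 2, so that an
-- intermediate stripped prefix has length ≤ 1.
def Pre_parent_path (path : String) (parent_num : Int) : Prop :=
  1 < path.toList.length ∧
  ∀ p ∈ (pvSepsDesc path.toList).take ((max parent_num 1).toNat - 1), 2 ≤ p

instance (path : String) (parent_num : Int) : Decidable (Pre_parent_path path parent_num) := by
  unfold Pre_parent_path; infer_instance

def pvWitness_parent_path : String × Int := ("ab/cd/ef", 2)

def Spec_parent_path (path : String) (parent_num : Int) (out : String) : Prop := out = parent_path_alt path parent_num
instance (path : String) (parent_num : Int) (out : String) : Decidable (Spec_parent_path path parent_num out) := by unfold Spec_parent_path; infer_instance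

-- ===== CLAIM (what is proved, stated in full; the proofs are below) =====
def Claim_equal_parent_path : Prop := ∀ (path : String) (parent_num : Int), Dom_parent_path path parent_num → Pre_parent_path path parent_num → Spec_parent_path path parent_num (parent_path path parent_num)

-- ===== LEMMAS AND PROOFS =====

-- the index of the last element satisfying p (as Python rfind reports it), via findIdx? on the reverse
def lastIdx (l : List Char) (p : Char → Bool) : Int :=
  (l.reverse.findIdx? p).elim (-1) (fun i => (l.length : Int) - 1 - i)

def omin : Option Nat → Option Nat → Option Nat
  | none, b => b
  | a, none => a
  | some i, some j => some (min i j)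

theorem singleton_isPrefixOf (c : Char) (l : List Char) :
    [c].isPrefixOf l = (l.head? == some c) := by
  cases l <;> simp [List.isPrefixOf, eq_comm]

theorem rfind_go_spec (l : List Char) (c : Char) :
    ∀ k, k < l.length → PySem.Chars.rfind.go l [c] k =
      ((l.take (k+1)).reverse.findIdx? (· == c)).elim (-1) (fun i => (k : Int) - i) := by
  intro k
  induction k with
  | zero =>
    intro hk
    cases l with
    | nil => simp at hk
    | cons a t =>
      rw [show PySem.Chars.rfind.go (a :: t) [c] 0 =
          (if [c].isPrefixOf (a :: t) then (0 : Int) else -1) from rfl]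
      rw [singleton_isPrefixOf]
      by_cases h : a = c <;> simp [h]
  | succ k ih =>
    intro hk
    have hk' : k < l.length := by omega
    have hdrop : l.drop (k+1) = l[k+1] :: l.drop (k+2) := List.drop_eq_getElem_cons hk
    have htake : l.take (k+2) = l.take (k+1) ++ [l[k+1]] := by
      rw [List.take_add_one, List.getElem?_eq_getElem hk]; rfl
    rw [show PySem.Chars.rfind.go l [c] (k+1) =
        (if [c].isPrefixOf (l.drop (k+1)) then ((k+1 : Nat) : Int) else PySem.Chars.rfind.go l [c] k)
      from rfl]
    rw [htake, hdrop, ih hk', singleton_isPrefixOf]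
    simp only [List.reverse_append, List.reverse_singleton, List.singleton_append,
      List.findIdx?_cons, List.head?_cons]
    by_cases h : l[k+1] = c
    · simp [h]
    · have hb : (l[k+1] == c) = false := by simp [h]
      rw [hb]
      cases hfi : (l.take (k+1)).reverse.findIdx? (· == c) <;> simp [h]

theorem rfind_single (l : List Char) (c : Char) :
    PySem.Chars.rfind l [c] = lastIdx l (· == c) := by
  cases l with
  | nil => simp [PySem.Chars.rfind, PySem.Chars.rfind.go, lastIdx, List.isPrefixOf]
  | cons a t =>
    show PySem.Chars.rfind.go (a :: t) [c] (t.length + 1) = _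
    rw [show PySem.Chars.rfind.go (a :: t) [c] (t.length + 1) =
        (if [c].isPrefixOf ((a :: t).drop (t.length + 1)) then ((t.length + 1 : Nat) : Int)
         else PySem.Chars.rfind.go (a :: t) [c] t.length) from rfl]
    have hd : (a :: t).drop (t.length + 1) = [] := by
      apply List.drop_eq_nil_of_le; simp
    rw [hd]
    simp only [List.isPrefixOf, Bool.false_eq_true, if_false]
    rw [rfind_go_spec (a :: t) c t.length (by simp)]
    have ht : (a :: t).take (t.length + 1) = a :: t := List.take_of_length_le (by simp)
    rw [ht]
    unfold lastIdx
    cases hfi : (a :: t).reverse.findIdx? (· == c) <;> simp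

theorem findIdx?_or (r : List Char) (p q : Char → Bool) :
    r.findIdx? (fun c => p c || q c) = omin (r.findIdx? p) (r.findIdx? q) := by
  induction r with
  | nil => simp [omin]
  | cons a t ih =>
    simp only [List.findIdx?_cons]
    by_cases hp : p a
    · by_cases hq : q a <;> cases hfq : t.findIdx? q <;> simp [hp, hq, omin]
    · by_cases hq : q a
      · cases hfp : t.findIdx? p <;> simp [hp, hq, omin]
      · simp only [hp, hq, Bool.or_false]
        rw [ih]
        cases hfp : t.findIdx? p <;> cases hfq : t.findIdx? q <;>
          simp [omin, Nat.succ_min_succ]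

theorem findSepA_spec (r : List Char) :
    ∀ i, findSepA r i = (r.findIdx? pvIsSep).elim 0 (fun j => i + j + 1) := by
  induction r with
  | nil => intro i; simp [findSepA]
  | cons a t ih =>
    intro i
    simp only [findSepA, List.findIdx?_cons]
    by_cases h : pvIsSep a
    · simp [h]
    · simp only [h]
      rw [ih (i+1)]
      cases hfi : t.findIdx? pvIsSep <;> (simp; try omega)

theorem findIdx?_rev_lt {l : List Char} {p : Char → Bool} {i : Nat}
    (h : l.reverse.findIdx? p = some i) : i < l.length := by
  have := (List.findIdx?_eq_some_iff_findIdx_eq.mp h).1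
  simpa using this

-- one strip step of A equals one strip step of B
theorem strip_eq (l : List Char) :
    (if findSepA l.reverse 0 ≠ 0 then l.take (l.length - findSepA l.reverse 0) else l) =
    (if max (PySem.Chars.rfind l ['/']) (PySem.Chars.rfind l ['\\']) ≠ -1
     then l.take (max (PySem.Chars.rfind l ['/']) (PySem.Chars.rfind l ['\\'])).toNat
     else l) := by
  rw [rfind_single, rfind_single, findSepA_spec _ 0]
  have hor : l.reverse.findIdx? pvIsSep
      = omin (l.reverse.findIdx? (· == '/')) (l.reverse.findIdx? (· == '\\')) := by
    rw [show l.reverse.findIdx? pvIsSep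
        = l.reverse.findIdx? (fun c => (c == '/') || (c == '\\')) from rfl]
    exact findIdx?_or _ _ _
  unfold lastIdx
  rw [hor]
  rcases hf1 : l.reverse.findIdx? (· == '/') with _ | i1 <;>
    rcases hf2 : l.reverse.findIdx? (· == '\\') with _ | i2 <;>
    simp only [omin, Option.elim]
  · simp
  · have hi2 : i2 < l.length := findIdx?_rev_lt hf2
    split_ifs with h1 h2 <;> try omega
    congr 1
    omega
  · have hi1 : i1 < l.length := findIdx?_rev_lt hf1
    split_ifs with h1 h2 <;> try omega
    congr 1
    omega
  · have hi1 : i1 < l.length := findIdx?_rev_lt hf1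
    have hi2 : i2 < l.length := findIdx?_rev_lt hf2
    split_ifs with h1 h2 <;> try omega
    congr 1
    omega

theorem main_eq (path : String) (parent_num : Int) :
    parent_path path parent_num = stripLoopB (max parent_num 1).toNat path.toList := by
  rw [parent_path]
  have hiter : ∃ k : Nat, (max parent_num 1).toNat = k + 1 := ⟨(max parent_num 1).toNat - 1, by omega⟩
  obtain ⟨k, hk⟩ := hiter
  rw [hk]
  have hB : stripLoopB (k+1) path.toList =
      (if path.toList.length ≤ 1 then ""
       else stripLoopB k
         (if max (PySem.Chars.rfind path.toList ['/']) (PySem.Chars.rfind path.toList ['\\']) ≠ -1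
          then path.toList.take (max (PySem.Chars.rfind path.toList ['/'])
            (PySem.Chars.rfind path.toList ['\\'])).toNat
          else path.toList)) := rfl
  by_cases hlen : path.toList.length ≤ 1
  · rw [hB, if_pos hlen, if_pos hlen]
  · rw [hB, if_neg hlen, if_neg hlen, if_neg hlen, ← strip_eq]
    by_cases hrec : parent_num > 1
    · have hk' : (max (parent_num - 1) 1).toNat = k := by omega
      rw [dif_pos hrec, main_eq _ (parent_num - 1), hk']
      congr 1
      by_cases hs : findSepA path.toList.reverse 0 ≠ 0 <;> simp [hs]
    · have hk0 : k = 0 := by omega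
      rw [dif_neg hrec, hk0]
      by_cases hs : findSepA path.toList.reverse 0 ≠ 0 <;> simp [stripLoopB, hs]
termination_by parent_num.toNat
decreasing_by omega

-- ===== VERDICT (by name: the statement is the Claim_ definition above) =====
theorem parent_path_spec : Claim_equal_parent_path := by
  intro path parent_num _ _
  unfold Spec_parent_path parent_path_alt
  exact main_eq path parent_num
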